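-- pv_equiv track=rewrite | github.com/KhaosResearch/sigpac-tools | src/wip-file.py | __findComunidad
-- ===== SOURCE A (Python) =====
-- def __findComunidad(provincia: int) -> int:
--     COMUNIDAD_PROVINCIAS = {
--         1: [4, 11, 14, 18, 21, 23, 29, 41],
--         2: [22, 44, 50],
--         3: [33],
--         4: [7],
--         5: [35, 38],
--         6: [39],
--         7: [5, 9, 24, 34, 37, 40, 42, 47, 49],
--         8: [2, 13, 16, 19, 45],
--         9: [8, 17, 25, 43],
--         10: [3, 12, 46],
--         11: [6, 10],
--         12: [15, 27, 32, 36],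
--         13: [28],
--         14: [30],
--         15: [31],
--         16: [1, 20, 48],
--         17: [26],
--         18: [51],
--         19: [52],
--     }
--     for comunidad, provincias in COMUNIDAD_PROVINCIAS.items():
--         if provincia in provincias:
--             return comunidad
--     return None
-- ===== SOURCE B (Python) =====
-- PROVINCIA_COMUNIDAD = {
--     1: 16, 2: 8, 3: 10, 4: 1, 5: 7, 6: 11, 7: 4, 8: 9, 9: 7, 10: 11,
--     11: 1, 12: 10, 13: 8, 14: 1, 15: 12, 16: 8, 17: 9, 18: 1, 19: 8, 20: 16,
--     21: 1, 22: 2, 23: 1, 24: 7, 25: 9, 26: 17, 27: 12, 28: 13, 29: 1, 30: 14,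
--     31: 15, 32: 12, 33: 3, 34: 7, 35: 5, 36: 12, 37: 7, 38: 5, 39: 6, 40: 7,
--     41: 1, 42: 7, 43: 9, 44: 2, 45: 8, 46: 10, 47: 7, 48: 16, 49: 7, 50: 2,
--     51: 18, 52: 19,
-- }
--
--
-- def __findComunidad(provincia: int) -> int:
--     return PROVINCIA_COMUNIDAD.get(provincia)
-- ===== Notes on version B (the rewrite author's own statement) =====
-- stated objective: simpler
-- what changed: Replaces the loop over community groups with repeated list-membership tests by a single direct lookup in a pre-built inverted province->community dict (no loop, no scan at call time).
import Mathlib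
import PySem

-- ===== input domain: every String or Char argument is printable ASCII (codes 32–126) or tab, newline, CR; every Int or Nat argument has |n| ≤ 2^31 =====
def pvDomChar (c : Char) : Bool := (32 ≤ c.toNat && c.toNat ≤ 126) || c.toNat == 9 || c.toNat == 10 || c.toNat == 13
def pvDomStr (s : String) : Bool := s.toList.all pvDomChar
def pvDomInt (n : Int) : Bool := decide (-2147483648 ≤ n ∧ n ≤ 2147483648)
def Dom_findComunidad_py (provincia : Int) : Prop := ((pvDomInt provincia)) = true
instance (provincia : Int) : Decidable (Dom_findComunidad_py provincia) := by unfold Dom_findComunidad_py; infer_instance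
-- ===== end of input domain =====

-- B replaces A's loop over community groups (a list-membership test per group) by a single
-- lookup in a pre-built inverted province→community dict; same return value everywhere (objective: simpler).

-- ===== PORT A =====
-- the literal dict COMUNIDAD_PROVINCIAS, in insertion order
def pvComunidadProvincias : PySem.Dict Int (List Int) :=
  PySem.Dict.mk [(1, [4, 11, 14, 18, 21, 23, 29, 41]), (2, [22, 44, 50]), (3, [33]), (4, [7]), (5, [35, 38]), (6, [39]), (7, [5, 9, 24, 34, 37, 40, 42, 47, 49]), (8, [2, 13, 16, 19, 45]), (9, [8, 17, 25, 43]), (10, [3, 12, 46]), (11, [6, 10]), (12, [15, 27, 32, 36]), (13, [28]), (14, [30]), (15, [31]), (16, [1, 20, 48]), (17, [26]), (18, [51]), (19, [52])]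

-- the for-loop with early return: first (comunidad, provincias) with provincia ∈ provincias, else None
def pvLoopA (provincia : Int) : List (Int × List Int) → Option Int
  | [] => none
  | (comunidad, provincias) :: rest =>
      if provincias.contains provincia then some comunidad else pvLoopA provincia rest

def findComunidad_py (provincia : Int) : Option Int :=
  pvLoopA provincia pvComunidadProvincias.items

-- ===== PORT B =====
-- the literal inverted dict PROVINCIA_COMUNIDAD from Source B
def pvProvinciaComunidad : PySem.Dict Int Int :=
  PySem.Dict.mk [(1, 16), (2, 8), (3, 10), (4, 1), (5, 7), (6, 11), (7, 4), (8, 9), (9, 7), (10, 11), (11, 1), (12, 10), (13, 8), (14, 1), (15, 12), (16, 8), (17, 9), (18, 1), (19, 8), (20, 16), (21, 1), (22, 2), (23, 1), (24, 7), (25, 9), (26, 17), (27, 12), (28, 13), (29, 1), (30, 14), (31, 15), (32, 12), (33, 3), (34, 7), (35, 5), (36, 12), (37, 7), (38, 5), (39, 6), (40, 7), (41, 1), (42, 7), (43, 9), (44, 2), (45, 8), (46, 10), (47, 7), (48, 16), (49, 7), (50, 2), (51, 18), (52, 19)]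

def findComunidad_py_alt (provincia : Int) : Option Int :=
  pvProvinciaComunidad.get? provincia

-- ===== PRECONDITION & SPEC =====
def Spec_findComunidad_py (provincia : Int) (out : Option Int) : Prop := out = findComunidad_py_alt provincia
instance (provincia : Int) (out : Option Int) : Decidable (Spec_findComunidad_py provincia out) := by unfold Spec_findComunidad_py; infer_instance

-- ===== CLAIM (what is proved, stated in full; the proofs are below) =====
def Claim_equal_findComunidad_py : Prop := ∀ (provincia : Int), Dom_findComunidad_py provincia → Spec_findComunidad_py provincia (findComunidad_py provincia)

-- ===== LEMMAS AND PROOFS =====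
-- A's loop returns none when the looked-up province is in no group
theorem pvLoopA_none (p : Int) (l : List (Int × List Int)) (h : ∀ cp ∈ l, p ∉ cp.2) :
    pvLoopA p l = none := by
  induction l with
  | nil => rfl
  | cons hd tl ih =>
    obtain ⟨c, ps⟩ := hd
    have h1 : ps.contains p = false := by
      simpa using h (c, ps) (List.mem_cons_self)
    simp only [pvLoopA, h1, Bool.false_eq_true, if_false]
    exact ih fun cp hcp => h cp (List.mem_cons_of_mem _ hcp)

-- lookup in a literal dict returns none when the key is absent
theorem pvGetMk_none (p : Int) (l : List (Int × Int)) (h : ∀ kv ∈ l, p ≠ kv.1) :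
    (PySem.Dict.mk l).get? p = none := by
  induction l with
  | nil => rfl
  | cons hd tl ih =>
    rw [PySem.Dict.get?_mk_cons]
    have h1 : (hd.1 == p) = false := by
      simpa using fun e => h hd (List.mem_cons_self) e.symm
    simp only [h1, Bool.false_eq_true, if_false]
    exact ih fun kv hkv => h kv (List.mem_cons_of_mem _ hkv)

-- every province listed in A's groups lies in 1..52
theorem pvA_bounds : ∀ cp ∈ pvComunidadProvincias.items, ∀ q ∈ cp.2, 1 ≤ q ∧ q ≤ 52 := by decide

-- every key of B's inverted dict lies in 1..52
theorem pvB_bounds : ∀ kv ∈ [(1, (16 : Int)), (2, 8), (3, 10), (4, 1), (5, 7), (6, 11), (7, 4), (8, 9), (9, 7), (10, 11), (11, 1), (12, 10), (13, 8), (14, 1), (15, 12), (16, 8), (17, 9), (18, 1), (19, 8), (20, 16), (21, 1), (22, 2), (23, 1), (24, 7), (25, 9), (26, 17), (27, 12), (28, 13), (29, 1), (30, 14), (31, 15), (32, 12), (33, 3), (34, 7), (35, 5), (36, 12), (37, 7), (38, 5), (39, 6), (40, 7), (41, 1), (42, 7), (43, 9), (44, 2), (45, 8), (46, 10), (47, 7),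 (48, 16), (49, 7), (50, 2), (51, 18), (52, 19)], 1 ≤ (kv.1 : Int) ∧ (kv.1 : Int) ≤ 52 := by decide

-- ===== VERDICT (by name: the statement is the Claim_ definition above) =====
set_option maxRecDepth 10000 in
theorem findComunidad_py_spec : Claim_equal_findComunidad_py := by
  intro p _
  unfold Spec_findComunidad_py
  by_cases h : 1 ≤ p ∧ p ≤ 52
  · obtain ⟨h1, h2⟩ := h
    interval_cases p <;> decide
  · rw [show findComunidad_py p = none from
        pvLoopA_none p _ fun cp hcp hq => h (pvA_bounds cp hcp p hq),
      show findComunidad_py_alt p = none from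
        pvGetMk_none p _ fun kv hkv e => h (e ▸ pvB_bounds kv hkv)]
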